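-- pv_equiv track=rewrite | github.com/ShearmanChua/ontonotes-pipeline | processing/convertbio.py | bio_to_bioul
-- ===== SOURCE A (Python) =====
-- def bio_to_bioul(labels):
--     """Convert a sequence of BIO labels to BIOUL labels.
--     :param labels: A list of labels.
--     :return: A list of converted labels.
--     """
--     label_len = len(labels)
--     labels_bioes = []
--     for idx, label in enumerate(labels):
--         next_label = labels[idx + 1] if idx < label_len - 1 else 'O'
--         if label == 'O':
--             labels_bioes.append('O')
--         elif label.startswith('B-'):
--             if next_label.startswith('I-'):
--                 labels_bioes.append(label)
--             else:
--                 labels_bioes.append('U-' + label[2:])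
--         else:
--             if next_label.startswith('I-'):
--                 labels_bioes.append(label)
--             else:
--                 labels_bioes.append('L-' + label[2:])
--     return labels_bioes
-- ===== SOURCE B (Python) =====
-- def bio_to_bioul(labels):
--     """Convert a sequence of BIO labels to BIOUL labels (span/chunk scan)."""
--     out = []
--     n = len(labels)
--     i = 0
--     while i < n:
--         # extend the chunk while the following label continues it with 'I-'
--         j = i
--         while j + 1 < n and labels[j + 1].startswith('I-'):
--             out.append(labels[j])  # interior element, verbatim
--             j += 1
--         last = labels[j]
--         if last == 'O':
--             out.append('O')
--         elif last.startswith('B-'):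
--             out.append('U-' + last[2:])
--         else:
--             out.append('L-' + last[2:])
--         i = j + 1
--     return out
-- ===== Notes on version B (the rewrite author's own statement) =====
-- stated objective: alternative
-- what changed: Replaces the per-element successor-lookahead loop (enumerate plus labels[idx+1] indexing) by a span scan: an outer loop walks chunk by chunk, an inner loop emits interior elements verbatim while the next label starts with 'I-', and only each chunk's last element is transformed.
import Mathlib
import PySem

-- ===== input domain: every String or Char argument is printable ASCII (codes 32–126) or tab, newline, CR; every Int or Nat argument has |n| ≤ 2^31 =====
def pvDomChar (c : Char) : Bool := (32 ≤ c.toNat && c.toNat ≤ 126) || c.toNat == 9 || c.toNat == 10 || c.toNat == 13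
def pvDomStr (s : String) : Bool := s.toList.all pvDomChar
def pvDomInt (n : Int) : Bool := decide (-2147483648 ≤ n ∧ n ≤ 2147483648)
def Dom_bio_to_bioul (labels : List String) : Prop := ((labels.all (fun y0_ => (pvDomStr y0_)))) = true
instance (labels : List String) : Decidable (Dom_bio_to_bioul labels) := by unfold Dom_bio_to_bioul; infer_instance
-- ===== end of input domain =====

-- B replaces A's per-element successor lookahead by a chunk scan (interiors verbatim, only the
-- chunk's last element transformed); same O(n) cost, different decomposition.

-- ===== PORT A =====
def bio_to_bioul (labels : List String) : List String :=
  let label_len : Int := labels.length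
  (PySem.List.enumerate labels 0).foldl
    (fun labels_bioes p =>
      let idx := p.1
      let label := p.2
      let next_label := if idx < label_len - 1 then PySem.List.pyGetD labels (idx + 1) "O" else "O"
      if label == "O" then labels_bioes ++ ["O"]
      else if PySem.Str.startswith label "B-" then
        if PySem.Str.startswith next_label "I-" then labels_bioes ++ [label]
        else labels_bioes ++ ["U-" ++ PySem.Str.slice label (some 2) none]
      else
        if PySem.Str.startswith next_label "I-" then labels_bioes ++ [label]
        else labels_bioes ++ ["L-" ++ PySem.Str.slice label (some 2) none])
    []

-- ===== PORT B =====
-- final transformation applied to a chunk's last element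
def pvFinal (last : String) : String :=
  if last == "O" then "O"
  else if PySem.Str.startswith last "B-" then "U-" ++ PySem.Str.slice last (some 2) none
  else "L-" ++ PySem.Str.slice last (some 2) none

-- inner while loop: returns (interior elements emitted verbatim, chunk's last element, rest)
def pvChunk (l : String) : List String → List String × String × List String
  | [] => ([], l, [])
  | r :: rs =>
    if PySem.Str.startswith r "I-" then
      let (ints, last, rem) := pvChunk r rs
      (l :: ints, last, rem)
    else ([], l, r :: rs)

theorem pvChunk_rem_le (l : String) (rest : List String) :
    (pvChunk l rest).2.2.length ≤ rest.length := by
  induction rest generalizing l with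
  | nil => simp [pvChunk]
  | cons r rs ih =>
    simp only [pvChunk]
    split
    · have := ih r
      cases h : pvChunk r rs with
      | mk a b => simp_all; omega
    · simp

-- outer while loop over chunks
def bio_to_bioul_alt : List String → List String
  | [] => []
  | l :: rest =>
    let c := pvChunk l rest
    c.1 ++ [pvFinal c.2.1] ++ bio_to_bioul_alt c.2.2
termination_by xs => xs.length
decreasing_by
  have := pvChunk_rem_le l rest
  simpa using Nat.lt_succ_of_le this

-- ===== PRECONDITION & SPEC =====
def Spec_bio_to_bioul (labels : List String) (out : List String) : Prop := out = bio_to_bioul_alt labels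
instance (labels : List String) (out : List String) : Decidable (Spec_bio_to_bioul labels out) := by unfold Spec_bio_to_bioul; infer_instance

-- ===== CLAIM (what is proved, stated in full; the proofs are below) =====
def Claim_equal_bio_to_bioul : Prop := ∀ (labels : List String), Dom_bio_to_bioul labels → Spec_bio_to_bioul labels (bio_to_bioul labels)

-- ===== LEMMAS AND PROOFS =====

-- the per-element value A appends, as a function of the element and its successor
def pvStep (next label : String) : String :=
  if label == "O" then "O"
  else if PySem.Str.startswith label "B-" then
    if PySem.Str.startswith next "I-" then label
    else "U-" ++ PySem.Str.slice label (some 2) none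
  else
    if PySem.Str.startswith next "I-" then label
    else "L-" ++ PySem.Str.slice label (some 2) none

theorem pvStep_eq (next label : String) :
    pvStep next label = if PySem.Str.startswith next "I-" then label else pvFinal label := by
  unfold pvStep pvFinal
  by_cases hO : label = "O"
  · subst hO; split_ifs <;> simp_all
  · split_ifs <;> simp_all

-- a middle normal form both ports reduce to: per-element with a one-step lookahead
def pvSimple : List String → List String
  | [] => []
  | [l] => [pvFinal l]
  | l :: r :: rs =>
    (if PySem.Str.startswith r "I-" then l else pvFinal l) :: pvSimple (r :: rs)

theorem alt_eq_simple (labels : List String) : bio_to_bioul_alt labels = pvSimple labels := by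
  induction labels with
  | nil => simp [bio_to_bioul_alt, pvSimple]
  | cons l rest ih =>
    cases rest with
    | nil => simp [bio_to_bioul_alt, pvChunk, pvSimple]
    | cons r rs =>
      rw [bio_to_bioul_alt]
      simp only [pvChunk, pvSimple]
      split
      · cases h : pvChunk r rs with
        | mk a b =>
          have : bio_to_bioul_alt (r :: rs) = a ++ [pvFinal b.1] ++ bio_to_bioul_alt b.2 := by
            rw [bio_to_bioul_alt]; rw [h]
          simp_all
      · rw [← ih]; simp

theorem a_foldl_map (xs : List (Int × String)) (labels : List String)
    (acc : List String) :
    xs.foldl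
      (fun labels_bioes p =>
        let idx := p.1
        let label := p.2
        let next_label := if idx < (labels.length : Int) - 1 then PySem.List.pyGetD labels (idx + 1) "O" else "O"
        if label == "O" then labels_bioes ++ ["O"]
        else if PySem.Str.startswith label "B-" then
          if PySem.Str.startswith next_label "I-" then labels_bioes ++ [label]
          else labels_bioes ++ ["U-" ++ PySem.Str.slice label (some 2) none]
        else
          if PySem.Str.startswith next_label "I-" then labels_bioes ++ [label]
          else labels_bioes ++ ["L-" ++ PySem.Str.slice label (some 2) none]) acc
    = acc ++ xs.map (fun p =>
        pvStep (if p.1 < (labels.length : Int) - 1 then PySem.List.pyGetD labels (p.1 + 1) "O" else "O") p.2) := by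
  induction xs generalizing acc with
  | nil => simp
  | cons x t ih =>
    simp only [List.foldl_cons, List.map_cons]
    rw [ih]
    have hx : (let idx := x.1
        let label := x.2
        let next_label := if idx < (labels.length : Int) - 1 then PySem.List.pyGetD labels (idx + 1) "O" else "O"
        if label == "O" then acc ++ ["O"]
        else if PySem.Str.startswith label "B-" then
          if PySem.Str.startswith next_label "I-" then acc ++ [label]
          else acc ++ ["U-" ++ PySem.Str.slice label (some 2) none]
        else
          if PySem.Str.startswith next_label "I-" then acc ++ [label]
          else acc ++ ["L-" ++ PySem.Str.slice label (some 2) none])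
        = acc ++ [pvStep (if x.1 < (labels.length : Int) - 1 then PySem.List.pyGetD labels (x.1 + 1) "O" else "O") x.2] := by
      simp only [pvStep]
      split_ifs <;> simp_all
    rw [hx]
    simp

theorem startswith_O_I : PySem.Str.startswith "O" "I-" = false := by decide

theorem enum_map_eq_simple (labels : List String) (k : Nat) (d : List String)
    (hd : labels.drop k = d) :
    (PySem.List.enumerate d (k : Int)).map (fun p =>
        pvStep (if p.1 < (labels.length : Int) - 1 then PySem.List.pyGetD labels (p.1 + 1) "O" else "O") p.2)
      = pvSimple d := by
  induction d generalizing k with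
  | nil => simp [pvSimple]
  | cons l ds ih =>
    have hlen : ds.length + 1 = labels.length - k := by
      have := congrArg List.length hd
      simp [List.length_drop] at this
      omega
    have hk : k < labels.length := by omega
    rw [PySem.List.enumerate_cons, List.map_cons]
    cases ds with
    | nil =>
      simp only [List.length_nil] at hlen
      have hkl : ¬ ((k : Int) < (labels.length : Int) - 1) := by
        have h1 : k + 1 = labels.length := by omega
        omega
      simp only [pvSimple, hkl, if_false, PySem.List.enumerate_nil, List.map_nil]
      rw [pvStep_eq, startswith_O_I]
      simp
    | cons r rs =>
      simp only [List.length_cons] at hlen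
      have hkl : (k : Int) < (labels.length : Int) - 1 := by
        have h1 : k + 2 ≤ labels.length := by omega
        omega
      have hget : labels[k + 1]? = some r := by
        have : (labels.drop k)[1]? = some r := by rw [hd]; simp
        rw [List.getElem?_drop] at this
        simpa [Nat.add_comm] using this
      have hnext : PySem.List.pyGetD labels ((k : Int) + 1) "O" = r := by
        have : ((k : Int) + 1) = ((k + 1 : Nat) : Int) := by push_cast; ring
        rw [this, PySem.List.pyGetD_natCast]
        simp [List.getD, hget]
      have hdrop : labels.drop (k + 1) = r :: rs := by
        have := congrArg List.tail hd
        simpa [List.tail_drop] using this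
      have ihr := ih (k + 1) hdrop
      simp only [pvSimple]
      rw [hkl |> if_pos, hnext, pvStep_eq]
      have : ((k : Int) + 1) = ((k + 1 : Nat) : Int) := by push_cast; ring
      rw [this, ihr]

-- ===== VERDICT (by name: the statement is the Claim_ definition above) =====
theorem bio_to_bioul_spec : Claim_equal_bio_to_bioul := by
  intro labels _
  unfold Spec_bio_to_bioul bio_to_bioul
  rw [a_foldl_map, alt_eq_simple]
  have := enum_map_eq_simple labels 0 labels (by simp)
  simpa using this
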